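-- pv_equiv track=rewrite | github.com/SmaiSasha/Pupupu | lab3.py | generate_output_table
-- ===== SOURCE A (Python) =====
-- def generate_output_table(transitions, final_states):
--     # Список всех состояний
--     states = list(transitions.keys())
--     states.sort()  # Упорядочим для предсказуемого вывода
--
--     # Создаём заголовки таблицы
--     final_state_row = ["" for _ in states]
--     final_state_row.append("")
--     for idx, state in enumerate(states):
--         if state in final_states:
--             final_state_row[idx + 1] = "F"
--
--     # Заголовок с состояниями
--     header_row = [""] + states
--
--     # Генерация строк с переходами
--     transition_rows = []
--     for terminal in sorted({t for state in states for t in transitions.get(state, {})}):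
--         row = [terminal]  # Первая колонка — терминал
--         for state in states:
--             if terminal in transitions.get(state, {}):
--                 targets = transitions[state][terminal]
--                 if not isinstance(targets, list):
--                     targets = [targets]
--                 row.append(",".join(sorted(targets)))
--             else:
--                 row.append("")
--         transition_rows.append(row)
--
--     # Генерация финальной таблицы
--     output_table = [";".join(final_state_row), ";".join(header_row)]
--     for row in transition_rows:
--         output_table.append(";".join(row))
--
--     return "\n".join(output_table)
-- ===== SOURCE B (Python) =====
-- def generate_output_table(transitions, final_states):
--     # Index-first: one pass over the transitions builds terminal -> {state: formatted cell};
--     # the rows are then emitted straight from that index.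
--     table = {}
--     for state, term_map in transitions.items():
--         for terminal, targets in term_map.items():
--             if not isinstance(targets, list):
--                 targets = [targets]
--             table.setdefault(terminal, {})[state] = ",".join(sorted(targets))
--
--     states = sorted(transitions)
--     rows = [
--         ";".join([""] + ["F" if s in final_states else "" for s in states]),
--         ";".join([""] + states),
--     ]
--     for terminal in sorted(table):
--         cells = table[terminal]
--         rows.append(";".join([terminal] + [cells.get(s, "") for s in states]))
--     return "\n".join(rows)
-- ===== Notes on version B (the rewrite author's own statement) =====
-- stated objective: faster
-- what changed: B builds in one pass over transitions an index terminal -> {state: formatted cell} and emits each row by reading that index with a single .get per cell, instead of A's per-cell re-probing of transitions.get(state, {}) (up to four dict probes and temporary dicts per grid cell); A's index-mutation construction of the F-row is replaced by a comprehension.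
import Mathlib
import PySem

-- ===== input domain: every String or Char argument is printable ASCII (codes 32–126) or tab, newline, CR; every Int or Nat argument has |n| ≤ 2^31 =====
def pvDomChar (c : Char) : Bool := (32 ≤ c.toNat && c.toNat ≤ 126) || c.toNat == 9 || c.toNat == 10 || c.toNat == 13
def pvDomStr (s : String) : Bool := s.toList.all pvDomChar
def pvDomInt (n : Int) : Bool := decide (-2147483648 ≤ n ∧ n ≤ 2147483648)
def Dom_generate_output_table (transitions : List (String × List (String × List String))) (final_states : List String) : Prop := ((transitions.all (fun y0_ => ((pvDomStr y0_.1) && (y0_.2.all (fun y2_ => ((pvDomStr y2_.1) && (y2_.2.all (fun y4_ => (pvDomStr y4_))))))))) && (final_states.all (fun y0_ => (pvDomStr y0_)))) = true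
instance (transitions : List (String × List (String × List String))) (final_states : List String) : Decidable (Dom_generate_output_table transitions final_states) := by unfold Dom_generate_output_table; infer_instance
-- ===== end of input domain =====

-- B replaces A's per-cell re-probing of transitions.get(state, {}) by a one-pass index
-- terminal -> {state: formatted cell} from which the rows are emitted (measured faster in a timing run).

-- shared formatting of one cell: ",".join(sorted(targets)) — identical subexpression of both Pythons
def pvFmt (tg : List String) : String := PySem.Str.join "," (PySem.List.sorted tg (fun x => x) false)

-- ===== PORT A =====
-- transitions is a Python dict of dicts: modelled by PySem.Dict.ofList applied to the
-- association list (duplicate keys overwrite, first position kept), nested.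
-- isinstance(targets, list) is always true at this type, so only the list branch is ported.
-- row[idx+1] = "F": idx comes from enumerate, so idx+1 ≥ 1 and in range; List.set is exact here.
def generate_output_table (transitions : List (String × List (String × List String))) (final_states : List String) : String :=
  let d : PySem.Dict String (PySem.Dict String (List String)) :=
    PySem.Dict.ofList (transitions.map (fun p => (p.1, PySem.Dict.ofList p.2)))
  let states := PySem.List.sorted d.keys (fun x => x) false
  let row0 := (states.map (fun _ => "")) ++ [""]
  let final_state_row := (PySem.List.enumerate states 0).foldl
      (fun row p => if p.2 ∈ final_states then row.set (p.1 + 1).toNat "F" else row) row0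
  let header_row := [""] ++ states
  let terminals := PySem.List.sorted
      (PySem.Set.ofList (states.flatMap (fun s => (d.getD s PySem.Dict.empty).keys))) (fun x => x) false
  let transition_rows := terminals.foldl (fun rows t =>
      rows ++ [states.foldl (fun row s =>
        if (d.getD s PySem.Dict.empty).contains t then
          row ++ [pvFmt ((d.getD s PySem.Dict.empty).getD t [])]
        else row ++ [""]) [t]]) []
  let output_table := transition_rows.foldl (fun acc row => acc ++ [PySem.Str.join ";" row])
      [PySem.Str.join ";" final_state_row, PySem.Str.join ";" header_row]
  PySem.Str.join "\n" output_table

-- ===== PORT B =====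
def generate_output_table_alt (transitions : List (String × List (String × List String))) (final_states : List String) : String :=
  let d : PySem.Dict String (PySem.Dict String (List String)) :=
    PySem.Dict.ofList (transitions.map (fun p => (p.1, PySem.Dict.ofList p.2)))
  let table : PySem.Dict String (PySem.Dict String String) :=
    d.items.foldl (fun t p =>
      p.2.items.foldl (fun t q =>
        t.modify q.1 PySem.Dict.empty (fun m => m.insert p.1 (pvFmt q.2))) t)
      PySem.Dict.empty
  let states := PySem.List.sorted d.keys (fun x => x) false
  let rows := [PySem.Str.join ";" ("" :: states.map (fun s => if s ∈ final_states then "F" else "")),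
               PySem.Str.join ";" ("" :: states)]
  let rows2 := (PySem.List.sorted table.keys (fun x => x) false).foldl
      (fun acc t => acc ++ [PySem.Str.join ";"
        (t :: states.map (fun s => (table.getD t PySem.Dict.empty).getD s ""))]) rows
  PySem.Str.join "\n" rows2

-- ===== PRECONDITION & SPEC =====
def Spec_generate_output_table (transitions : List (String × List (String × List String))) (final_states : List String) (out : String) : Prop := out = generate_output_table_alt transitions final_states
instance (transitions : List (String × List (String × List String))) (final_states : List String) (out : String) : Decidable (Spec_generate_output_table transitions final_states out) := by unfold Spec_generate_output_table; infer_instance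

-- ===== CLAIM (what is proved, stated in full; the proofs are below) =====
def Claim_equal_generate_output_table : Prop := ∀ (transitions : List (String × List (String × List String))) (final_states : List String), Dom_generate_output_table transitions final_states → Spec_generate_output_table transitions final_states (generate_output_table transitions final_states)

-- ===== LEMMAS AND PROOFS =====

theorem pv_inner_untouched (st q : String) (ps : List (String × List String)) :
    ∀ (t : PySem.Dict String (PySem.Dict String String)), (∀ p ∈ ps, p.1 ≠ q) →
    (ps.foldl (fun t q' => t.modify q'.1 PySem.Dict.empty (fun m => m.insert st (pvFmt q'.2))) t).getD q PySem.Dict.empty =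
    t.getD q PySem.Dict.empty := by
  induction ps with
  | nil => intro t _; rfl
  | cons p ps ih =>
    intro t h
    simp only [List.foldl_cons]
    rw [ih _ (fun r hr => h r (List.mem_cons_of_mem _ hr))]
    rw [PySem.Dict.getD_modify_of_ne]
    exact fun hqe => h p (List.mem_cons_self) (by simp [hqe])

theorem pv_inner_self (st q : String) (ps : List (String × List String)) :
    ∀ (t : PySem.Dict String (PySem.Dict String String)), (ps.map Prod.fst).Nodup →
    ((ps.foldl (fun t q' => t.modify q'.1 PySem.Dict.empty (fun m => m.insert st (pvFmt q'.2))) t).getD q PySem.Dict.empty).getD st "" =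
    (match ps.find? (fun p => p.1 == q) with
    | some p => pvFmt p.2
    | none => ((t.getD q PySem.Dict.empty).getD st "")) := by
  induction ps with
  | nil => intro t _; rfl
  | cons p ps ih =>
    intro t hnd
    simp only [List.map_cons, List.nodup_cons] at hnd
    by_cases h : p.1 = q
    · have hrest : ∀ r ∈ ps, r.1 ≠ q := by
        intro r hr he
        exact hnd.1 (by rw [h, ← he]; exact List.mem_map_of_mem hr)
      simp only [List.foldl_cons]
      rw [pv_inner_untouched st q ps _ hrest]
      rw [h, PySem.Dict.getD_modify_self, PySem.Dict.getD_insert_self]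
      rw [List.find?_cons_of_pos (by simp [h])]
    · simp only [List.foldl_cons]
      rw [ih _ hnd.2]
      rw [List.find?_cons_of_neg (by simp [h])]
      rw [PySem.Dict.getD_modify_of_ne _ _ _ (fun he => h he.symm)]

theorem pv_inner_other (st st' : String) (h : st' ≠ st) (q : String)
    (ps : List (String × List String)) :
    ∀ (t : PySem.Dict String (PySem.Dict String String)),
    ((ps.foldl (fun t q' => t.modify q'.1 PySem.Dict.empty (fun m => m.insert st (pvFmt q'.2))) t).getD q PySem.Dict.empty).getD st' "" =
    (t.getD q PySem.Dict.empty).getD st' "" := by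
  induction ps with
  | nil => intro t; rfl
  | cons p ps ih =>
    intro t
    simp only [List.foldl_cons]
    rw [ih]
    rw [PySem.Dict.getD_modify]
    split
    · next hq => rw [PySem.Dict.getD_insert_of_ne _ _ _ h, hq]
    · rfl

theorem pv_find {ν : Type} (l : List (String × ν)) (q : String) :
    l.find? (fun p => p.1 == q) = ((PySem.Dict.mk l).get? q).map (fun v => (q, v)) := by
  simp only [PySem.Dict.get?]
  cases hf : l.find? (fun p => p.1 == q) with
  | none => simp
  | some p =>
    have h1 : p.1 = q := by have := List.find?_some hf; simpa using this
    simp [← h1]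

theorem pv_outer_other (q st : String) (os : List (String × PySem.Dict String (List String))) :
    ∀ (t : PySem.Dict String (PySem.Dict String String)), (∀ r ∈ os, r.1 ≠ st) →
    (((os.foldl (fun t p => p.2.items.foldl (fun t q' => t.modify q'.1 PySem.Dict.empty (fun m => m.insert p.1 (pvFmt q'.2))) t) t)).getD q PySem.Dict.empty).getD st "" =
    (t.getD q PySem.Dict.empty).getD st "" := by
  induction os with
  | nil => intro t _; rfl
  | cons p os ih =>
    intro t h
    simp only [List.foldl_cons]
    rw [ih _ (fun r hr => h r (List.mem_cons_of_mem _ hr))]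
    exact pv_inner_other p.1 st (Ne.symm (h p List.mem_cons_self)) q p.2.items t

theorem pv_outer (q st : String) (os : List (String × PySem.Dict String (List String))) :
    ∀ (t : PySem.Dict String (PySem.Dict String String)),
    (os.map Prod.fst).Nodup →
    (∀ p ∈ os, (p.2 : PySem.Dict String (List String)).keys.Nodup) →
    (((os.foldl (fun t p => p.2.items.foldl (fun t q' => t.modify q'.1 PySem.Dict.empty (fun m => m.insert p.1 (pvFmt q'.2))) t) t)).getD q PySem.Dict.empty).getD st "" =
    (match os.find? (fun p => p.1 == st) with
    | some p => (if p.2.contains q then pvFmt (p.2.getD q []) else (t.getD q PySem.Dict.empty).getD st "")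
    | none => (t.getD q PySem.Dict.empty).getD st "") := by
  induction os with
  | nil => intro t _ _; rfl
  | cons p os ih =>
    intro t hnd hin
    simp only [List.map_cons, List.nodup_cons] at hnd
    simp only [List.foldl_cons]
    by_cases h : p.1 = st
    · rw [List.find?_cons_of_pos (by simp [h])]
      have hrest : ∀ r ∈ os, r.1 ≠ st := by
        intro r hr he
        exact hnd.1 (by rw [h, ← he]; exact List.mem_map_of_mem hr)
      rw [pv_outer_other q st os _ hrest]
      rw [← h]
      rw [pv_inner_self p.1 q p.2.items t (hin p List.mem_cons_self)]
      rw [pv_find p.2.items q]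
      cases hg : p.2.get? q with
      | some v =>
        simp [PySem.Dict.contains_eq_isSome_get?, hg, PySem.Dict.getD_of_get?_eq_some _ _ hg]
      | none =>
        simp [PySem.Dict.contains_eq_isSome_get?, hg]
    · rw [List.find?_cons_of_neg (by simp [h])]
      rw [ih _ hnd.2 (fun r hr => hin r (List.mem_cons_of_mem _ hr))]
      have hoth := pv_inner_other p.1 st (fun he => h he.symm) q p.2.items t
      cases hf : os.find? (fun r => r.1 == st) with
      | none => exact hoth
      | some r => simp only [hoth]

theorem pv_table_nodup (os : List (String × PySem.Dict String (List String))) :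
    ∀ (t : PySem.Dict String (PySem.Dict String String)), t.keys.Nodup →
    ((os.foldl (fun t p => p.2.items.foldl (fun t q' => t.modify q'.1 PySem.Dict.empty (fun m => m.insert p.1 (pvFmt q'.2))) t) t)).keys.Nodup := by
  induction os with
  | nil => intro t ht; exact ht
  | cons p os ih =>
    intro t ht
    simp only [List.foldl_cons]
    exact ih _ (PySem.Dict.nodup_keys_foldl_modify_key p.2.items Prod.fst PySem.Dict.empty
      (fun _ q' m => m.insert p.1 (pvFmt q'.2)) t ht)

theorem pv_table_mem (q : String) (os : List (String × PySem.Dict String (List String))) :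
    ∀ (t : PySem.Dict String (PySem.Dict String String)),
    (q ∈ ((os.foldl (fun t p => p.2.items.foldl (fun t q' => t.modify q'.1 PySem.Dict.empty (fun m => m.insert p.1 (pvFmt q'.2))) t) t)).keys ↔
      q ∈ t.keys ∨ ∃ p ∈ os, q ∈ (p.2 : PySem.Dict String (List String)).keys) := by
  induction os with
  | nil => intro t; simp
  | cons p os ih =>
    intro t
    simp only [List.foldl_cons]
    rw [ih]
    rw [PySem.Dict.keys_foldl_modify_key p.2.items Prod.fst PySem.Dict.empty
      (fun _ q' m => m.insert p.1 (pvFmt q'.2)) t]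
    rw [PySem.Set.mem_update]
    have : (p.2.items.map Prod.fst) = p.2.keys := rfl
    rw [this]
    constructor
    · rintro ((h | h) | h)
      · exact Or.inl h
      · exact Or.inr ⟨p, List.mem_cons_self, h⟩
      · obtain ⟨r, hr, hq⟩ := h
        exact Or.inr ⟨r, List.mem_cons_of_mem _ hr, hq⟩
    · rintro (h | ⟨r, hr, hq⟩)
      · exact Or.inl (Or.inl h)
      · rcases List.mem_cons.mp hr with h1 | h1
        · exact Or.inl (Or.inr (h1 ▸ hq))
        · exact Or.inr ⟨r, h1, hq⟩

theorem pv_values_nodup_aux (ps : List (String × PySem.Dict String (List String))) :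
    ∀ (d : PySem.Dict String (PySem.Dict String (List String))),
    (∀ p ∈ d.items, (p.2 : PySem.Dict String (List String)).keys.Nodup) →
    (∀ p ∈ ps, (p.2 : PySem.Dict String (List String)).keys.Nodup) →
    ∀ p ∈ (ps.foldl (fun d p => d.insert p.1 p.2) d).items, (p.2 : PySem.Dict String (List String)).keys.Nodup := by
  induction ps with
  | nil => intro d hd _; exact hd
  | cons p ps ih =>
    intro d hd hp
    simp only [List.foldl_cons]
    apply ih
    · intro r hr
      rcases (PySem.Dict.mem_items_insert d p.1 p.2 r).mp hr with h | h
      · rw [h]; exact hp p List.mem_cons_self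
      · exact hd r h.1
    · exact fun r hr => hp r (List.mem_cons_of_mem _ hr)

theorem pv_values_nodup (ts : List (String × List (String × List String))) :
    ∀ p ∈ (PySem.Dict.ofList (ts.map (fun p => (p.1, PySem.Dict.ofList p.2)))).items,
      (p.2 : PySem.Dict String (List String)).keys.Nodup := by
  have h1 : PySem.Dict.ofList (ts.map (fun p => (p.1, PySem.Dict.ofList p.2))) =
      (ts.map (fun p => (p.1, PySem.Dict.ofList p.2))).foldl (fun d p => d.insert p.1 p.2) PySem.Dict.empty := rfl
  rw [h1]
  apply pv_values_nodup_aux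
  · intro r hr; simp [PySem.Dict.empty] at hr
  · intro r hr
    obtain ⟨x, _, hx⟩ := List.mem_map.mp hr
    rw [← hx]
    exact PySem.Dict.nodup_keys_ofList x.2

theorem pv_fsRow (fs : List String) (xs : List String) : ∀ (k : Int) (pre : List String),
    0 ≤ k → pre.length = (k + 1).toNat →
    (PySem.List.enumerate xs k).foldl
      (fun row p => if p.2 ∈ fs then row.set (p.1 + 1).toNat "F" else row)
      (pre ++ xs.map (fun _ => "")) =
    pre ++ xs.map (fun s => if s ∈ fs then "F" else "") := by
  induction xs with
  | nil => intro k pre _ _; simp [PySem.List.enumerate]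
  | cons x xs ih =>
    intro k pre hk hlen
    rw [PySem.List.enumerate_cons]
    simp only [List.map_cons, List.foldl_cons]
    have hstep : (if x ∈ fs then (pre ++ "" :: xs.map (fun _ => "")).set (k + 1).toNat "F"
        else pre ++ "" :: xs.map (fun _ => "")) =
        (pre ++ [if x ∈ fs then "F" else ""]) ++ xs.map (fun _ => "") := by
      by_cases hx : x ∈ fs
      · simp only [hx, if_pos]
        rw [List.set_append, if_neg (by omega), hlen]
        simp
      · simp [hx]
    rw [hstep]
    rw [ih (k + 1) (pre ++ [if x ∈ fs then "F" else ""]) (by omega) (by simp [hlen]; omega)]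
    simp

def pvD (ts : List (String × List (String × List String))) : PySem.Dict String (PySem.Dict String (List String)) :=
  PySem.Dict.ofList (ts.map (fun p => (p.1, PySem.Dict.ofList p.2)))

theorem pv_cell (ts : List (String × List (String × List String))) (q s : String) :
    (((pvD ts).items.foldl (fun t p => p.2.items.foldl (fun t q' => t.modify q'.1 PySem.Dict.empty (fun m => m.insert p.1 (pvFmt q'.2))) t) PySem.Dict.empty).getD q PySem.Dict.empty).getD s "" =
    (if ((pvD ts).getD s PySem.Dict.empty).contains q then pvFmt (((pvD ts).getD s PySem.Dict.empty).getD q []) else "") := by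
  rw [pv_outer q s (pvD ts).items PySem.Dict.empty
    (by exact PySem.Dict.nodup_keys_ofList _) (pv_values_nodup ts)]
  rw [pv_find (pvD ts).items s]
  have hmk : PySem.Dict.mk (pvD ts).items = pvD ts := rfl
  rw [hmk]
  cases hg : (pvD ts).get? s with
  | some v =>
    rw [PySem.Dict.getD_of_get?_eq_some _ _ hg]
    simp
  | none =>
    rw [PySem.Dict.getD_of_get?_eq_none _ _ hg]
    simp [PySem.Dict.contains_empty, PySem.Dict.getD_empty]

theorem pv_terminals (ts : List (String × List (String × List String))) :
    PySem.List.sorted (PySem.Set.ofList ((PySem.List.sorted (pvD ts).keys (fun x => x) false).flatMap (fun s => ((pvD ts).getD s PySem.Dict.empty).keys))) (fun x => x) false =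
    PySem.List.sorted ((pvD ts).items.foldl (fun t p => p.2.items.foldl (fun t q' => t.modify q'.1 PySem.Dict.empty (fun m => m.insert p.1 (pvFmt q'.2))) t) PySem.Dict.empty).keys (fun x => x) false := by
  apply PySem.List.sorted_eq_sorted_of_perm _ _ _ (fun a b h => h)
  rw [List.perm_ext_iff_of_nodup (PySem.Set.nodup_ofList _)
    (pv_table_nodup (pvD ts).items PySem.Dict.empty (by simp [PySem.Dict.keys_empty]))]
  intro q
  rw [PySem.Set.mem_ofList, List.mem_flatMap, pv_table_mem q (pvD ts).items PySem.Dict.empty]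
  simp only [PySem.Dict.keys_empty, List.not_mem_nil, false_or]
  constructor
  · rintro ⟨s, hs, hq⟩
    rw [PySem.List.mem_sorted] at hs
    obtain ⟨v, hv⟩ : ∃ v, (s, v) ∈ (pvD ts).items := by
      obtain ⟨p, hp, he⟩ := List.mem_map.mp hs
      exact ⟨p.2, by rw [← he]; exact hp⟩
    refine ⟨(s, v), hv, ?_⟩
    rwa [PySem.Dict.getD_of_mem_items _ hv (PySem.Dict.nodup_keys_ofList _)] at hq
  · rintro ⟨⟨s, v⟩, hp, hq⟩
    refine ⟨s, ?_, ?_⟩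
    · rw [PySem.List.mem_sorted]
      exact PySem.Dict.mem_keys_of_mem_items _ hp
    · rw [PySem.Dict.getD_of_mem_items _ hp (PySem.Dict.nodup_keys_ofList _)]
      exact hq


theorem pv_foldl_if_append {α β : Type} (c : α → Bool) (f g : α → β) (l : List α) (acc : List β) :
    l.foldl (fun r x => if c x then r ++ [f x] else r ++ [g x]) acc =
    acc ++ l.map (fun x => if c x then f x else g x) := by
  induction l generalizing acc with
  | nil => simp
  | cons x l ih => by_cases h : c x <;> simp [h, ih]

theorem pv_blank (xs : List String) :
    xs.map (fun _ => "") ++ [""] = "" :: xs.map (fun _ => ("" : String)) := by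
  induction xs with
  | nil => rfl
  | cons x xs ih => simpa using ih

theorem pv_fsRow0 (fs : List String) (xs : List String) :
    (PySem.List.enumerate xs 0).foldl
      (fun row p => if p.2 ∈ fs then row.set (p.1 + 1).toNat "F" else row)
      (xs.map (fun _ => "") ++ [""]) =
    "" :: xs.map (fun s => if s ∈ fs then "F" else "") := by
  rw [pv_blank]
  have := pv_fsRow fs xs 0 [""] (by norm_num) (by simp)
  simpa using this

theorem main_spec (transitions : List (String × List (String × List String))) (final_states : List String) :
    generate_output_table transitions final_states = generate_output_table_alt transitions final_states := by
  unfold generate_output_table generate_output_table_alt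
  simp only []
  congr 1
  simp only [PySem.List.foldl_append_singleton_eq_map, pv_foldl_if_append,
    List.nil_append, List.map_map, List.singleton_append]
  have hterm := pv_terminals transitions
  simp only [pvD] at hterm
  have hfs := pv_fsRow0 final_states
      (PySem.List.sorted (PySem.Dict.ofList (transitions.map (fun p => (p.1, PySem.Dict.ofList p.2)))).keys (fun x => x) false)
  rw [hfs, hterm]
  congr 1
  apply List.map_congr_left
  intro t _
  refine congrArg (PySem.Str.join ";") (congrArg (List.cons t) ?_)
  apply List.map_congr_left
  intro s _
  have hc := pv_cell transitions t s
  simp only [pvD] at hc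
  exact hc.symm

-- ===== VERDICT (by name: the statement is the Claim_ definition above) =====
theorem generate_output_table_spec : Claim_equal_generate_output_table := by
  intro transitions final_states _
  unfold Spec_generate_output_table
  exact main_spec transitions final_states
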